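-- pv_equiv track=rewrite | github.com/Yang-YiFan/STR | setup.py | processResNetLayers
-- ===== SOURCE A (Python) =====
-- def processResNetLayers(layers):
--     tmp = [filename[:-4] for filename in layers if filename.endswith('.tns')]
--     unaryLayers = []
--     binaryLayers = []
--     for layer in tmp:
--         if "add" in layer:
--             binaryLayers.append(layer)
--         else:
--             unaryLayers.append(layer)
--     unaryLayers.sort()
--     binaryLayers.sort()
--     return unaryLayers, binaryLayers
-- ===== SOURCE B (Python) =====
-- def processResNetLayers(layers):
--     # one fused pass: filter, strip, partition and KEEP EACH LIST SORTED by
--     # incremental insertion (insertion sort); no call to sort()/sorted()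
--     unaryLayers = []
--     binaryLayers = []
--     for filename in layers:
--         if filename.endswith('.tns'):
--             layer = filename[:-4]
--             target = binaryLayers if "add" in layer else unaryLayers
--             i = 0
--             while i < len(target) and target[i] <= layer:
--                 i += 1
--             target.insert(i, layer)
--     return unaryLayers, binaryLayers
-- ===== Notes on version B (the rewrite author's own statement) =====
-- stated objective: alternative
-- what changed: Replaces A's staged pipeline (comprehension, then partition loop, then two list.sort calls) with a single fused pass that inserts each stripped name directly at its sorted position in the proper list (incremental insertion sort), so no sort call remains.
import Mathlib
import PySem

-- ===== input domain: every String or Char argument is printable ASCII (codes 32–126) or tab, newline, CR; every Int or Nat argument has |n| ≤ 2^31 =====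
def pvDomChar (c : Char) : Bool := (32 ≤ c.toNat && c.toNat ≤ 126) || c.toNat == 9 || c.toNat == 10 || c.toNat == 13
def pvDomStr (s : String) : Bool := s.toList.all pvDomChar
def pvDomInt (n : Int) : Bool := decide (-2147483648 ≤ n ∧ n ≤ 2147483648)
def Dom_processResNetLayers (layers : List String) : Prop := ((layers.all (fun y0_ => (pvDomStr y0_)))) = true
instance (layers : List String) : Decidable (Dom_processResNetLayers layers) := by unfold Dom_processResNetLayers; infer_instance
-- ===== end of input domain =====

-- B fuses filtering, stripping and partitioning into ONE pass that keeps both result lists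
-- sorted by inserting each element at its sorted position (insertion sort, no sort call);
-- same return value as A's partition-then-sort-each (alternative decomposition/algorithm).

-- ===== PORT A =====
def processResNetLayers (layers : List String) : List String × List String :=
  let tmp := (layers.filter (fun f => PySem.Str.endswith f ".tns")).map
      (fun f => PySem.Str.slice f none (some (-4)))
  let ub := tmp.foldl (fun (p : List String × List String) layer =>
      if PySem.Str.isIn "add" layer then (p.1, p.2 ++ [layer]) else (p.1 ++ [layer], p.2))
      ([], [])
  (PySem.List.sorted ub.1 (fun x => x) false, PySem.List.sorted ub.2 (fun x => x) false)

-- ===== PORT B =====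
-- B's index scan `while i < len(target) and target[i] <= layer ... target.insert(i, layer)`
-- as the obvious structural recursion: skip the prefix of elements ≤ layer, insert there.
def pvInsort : List String → String → List String
  | [], x => [x]
  | h :: t, x => if h ≤ x then h :: pvInsort t x else x :: h :: t

def processResNetLayers_alt (layers : List String) : List String × List String :=
  layers.foldl (fun (p : List String × List String) filename =>
      if PySem.Str.endswith filename ".tns" then
        let layer := PySem.Str.slice filename none (some (-4))
        if PySem.Str.isIn "add" layer then (p.1, pvInsort p.2 layer)
        else (pvInsort p.1 layer, p.2)
      else p)
    ([], [])

-- ===== PRECONDITION & SPEC =====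
def Spec_processResNetLayers (layers : List String) (out : List String × List String) : Prop := out = processResNetLayers_alt layers
instance (layers : List String) (out : List String × List String) : Decidable (Spec_processResNetLayers layers out) := by unfold Spec_processResNetLayers; infer_instance

-- ===== CLAIM =====
def Claim_equal_processResNetLayers : Prop := ∀ (layers : List String), Dom_processResNetLayers layers → Spec_processResNetLayers layers (processResNetLayers layers)

-- ===== LEMMAS AND PROOFS =====

theorem pvInsort_perm (xs : List String) (x : String) : (pvInsort xs x).Perm (x :: xs) := by
  induction xs with
  | nil => simp [pvInsort]
  | cons h t ih =>
    simp only [pvInsort]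
    split
    · exact ((ih.cons h).trans (List.Perm.swap x h t))
    · exact List.Perm.refl _

theorem pvInsort_pairwise (xs : List String) (x : String)
    (hs : xs.Pairwise (· ≤ ·)) : (pvInsort xs x).Pairwise (· ≤ ·) := by
  induction xs with
  | nil => simp [pvInsort]
  | cons h t ih =>
    rcases List.pairwise_cons.mp hs with ⟨hh, ht⟩
    simp only [pvInsort]
    split
    · rename_i hle
      refine List.pairwise_cons.mpr ⟨?_, ih ht⟩
      intro y hy
      have := (pvInsort_perm t x).mem_iff.mp hy
      rcases List.mem_cons.mp this with rfl | hmem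
      · exact hle
      · exact hh y hmem
    · rename_i hgt
      have hx : x ≤ h := le_of_lt (lt_of_not_ge hgt)
      refine List.pairwise_cons.mpr ⟨?_, hs⟩
      intro y hy
      rcases List.mem_cons.mp hy with rfl | hmem
      · exact hx
      · exact le_trans hx (hh y hmem)

-- insertion sort of a whole list, as B performs it incrementally
theorem pvIsort_perm (ys acc : List String) :
    (ys.foldl pvInsort acc).Perm (acc ++ ys) := by
  induction ys generalizing acc with
  | nil => simp
  | cons h t ih =>
    simp only [List.foldl_cons]
    refine (ih (pvInsort acc h)).trans ?_
    refine ((pvInsort_perm acc h).append_right t).trans ?_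
    exact List.perm_middle.symm

theorem pvIsort_pairwise (ys acc : List String) (ha : acc.Pairwise (· ≤ ·)) :
    (ys.foldl pvInsort acc).Pairwise (· ≤ ·) := by
  induction ys generalizing acc with
  | nil => exact ha
  | cons h t ih => exact ih _ (pvInsort_pairwise acc h ha)

theorem pvIsort_eq_sorted (ys : List String) :
    PySem.List.sorted ys (fun x => x) false = ys.foldl pvInsort [] := by
  apply PySem.List.sorted_id_eq_of_perm_of_pairwise
  · simpa using pvIsort_perm ys []
  · exact pvIsort_pairwise ys [] (List.Pairwise.nil)

-- A's partition foldl computes the two filters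
theorem pvPartition_foldl (xs : List String) (u b : List String) :
    xs.foldl (fun (p : List String × List String) layer =>
      if PySem.Str.isIn "add" layer then (p.1, p.2 ++ [layer]) else (p.1 ++ [layer], p.2))
      (u, b)
    = (u ++ xs.filter (fun x => !PySem.Str.isIn "add" x),
       b ++ xs.filter (fun x => PySem.Str.isIn "add" x)) := by
  induction xs generalizing u b with
  | nil => simp
  | cons h t ih =>
    by_cases hp : PySem.Str.isIn "add" h = true <;>
      simp only [List.foldl_cons, List.filter_cons, hp, Bool.not_true, Bool.not_false,
        if_true, if_false, ih, List.append_assoc, List.singleton_append, Bool.false_eq_true]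

-- B's fused foldl equals running pvInsort over the two partition-filters of tmp
theorem pvFused_foldl (layers : List String) (u b : List String) :
    layers.foldl (fun (p : List String × List String) filename =>
      if PySem.Str.endswith filename ".tns" then
        let layer := PySem.Str.slice filename none (some (-4))
        if PySem.Str.isIn "add" layer then (p.1, pvInsort p.2 layer)
        else (pvInsort p.1 layer, p.2)
      else p) (u, b)
    = (((((layers.filter (fun f => PySem.Str.endswith f ".tns")).map
            (fun f => PySem.Str.slice f none (some (-4)))).filter
            (fun x => !PySem.Str.isIn "add" x)).foldl pvInsort u),
       ((((layers.filter (fun f => PySem.Str.endswith f ".tns")).map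
            (fun f => PySem.Str.slice f none (some (-4)))).filter
            (fun x => PySem.Str.isIn "add" x)).foldl pvInsort b)) := by
  induction layers generalizing u b with
  | nil => simp
  | cons f t ih =>
    by_cases he : PySem.Str.endswith f ".tns" = true
    · by_cases ha : PySem.Str.isIn "add" (PySem.Str.slice f none (some (-4))) = true
      · simp only [List.foldl_cons, List.filter_cons, List.map_cons, he, ha, if_true,
          Bool.not_true, Bool.false_eq_true, if_false, ih]
      · have ha' : PySem.Str.isIn "add" (PySem.Str.slice f none (some (-4))) = false :=
          Bool.eq_false_iff.mpr ha
        simp only [List.foldl_cons, List.filter_cons, List.map_cons, he, ha', if_true,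
          Bool.not_false, Bool.false_eq_true, if_false, ih]
    · have he' : PySem.Str.endswith f ".tns" = false := Bool.eq_false_iff.mpr he
      simp only [List.foldl_cons, List.filter_cons, he', Bool.false_eq_true, if_false, ih]

-- ===== VERDICT =====
theorem processResNetLayers_spec : Claim_equal_processResNetLayers := by
  intro layers _
  show processResNetLayers layers = processResNetLayers_alt layers
  unfold processResNetLayers processResNetLayers_alt
  simp only [pvPartition_foldl, List.nil_append, pvFused_foldl, pvIsort_eq_sorted]
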